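/- GENERATED by tools/from_farm_form.py from farm/worked/prog_main/Lemmas.lean (a worked proof of the farm's unit `prog_main`,
   accepted by the verdict) — do not edit. -/
import Toy.Spec.Units.prog_main

/-!
  Lemmas for the unit `prog_main` (0x105000, 42 instructions; c/toy/toy.c:65–80), a function with a PROTECTED frame
  (`Toy.Frames.prog_main`: base = RA − 168, 128 bytes, the 64-byte `buffer` at base + 32).

  Part 2: the walk, cut into one lemma per returned callee state (Toy/Spec/Proved/prog_main.lean chains them).

  Part 1 (pure, no machine steps): the prologue's / epilogue's inline shadow stores are `storesMem … prologue / epilogue` of the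
  layout, so that `ShadowInv.prologue_ra` / `.epilogue_ra` apply; `buffer` is a live object of the frame list with the
  function's own frame in front; a live range stays live under one more frame.
-/

open X86 X86.User Asan ProgX.Base Toy.Spec

set_option maxRecDepth 4000
set_option maxHeartbeats 4000000

namespace Toy.Spec.Proved.prog_main
open Toy.Spec.prog_main (Statement)

/-! ### The prologue and the epilogue as facts about memories -/

/-- The frame's base `RA − 168` as a number: the word subtraction does not wrap for a stack pointer. -/
theorem pm_toNat_sub168_w (sp : Word) (h : 168 ≤ sp.toNat) : (sp - 168).toNat = sp.toNat - 168 := by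
  u_omega

/-- The address of the inline shadow store at index 0: `rbx + 0xC00000` with `rbx = base >> 3`. -/
theorem pm_slot0_w (b : Word) (hb : b.toNat < 0x800000) : b >>> 3 + 12582912 = shadowAddr (b.toNat / 8 + 0) := by
  apply eq_shadowAddr
  have h3 := Asan.toNat_shr3 b
  rw [UInt64.toNat_add, h3]
  simp only [UInt64.reduceToNat]
  omega

/-- The address of the inline shadow store at index 12: `rbx + 0xC0000C`. -/
theorem pm_slot12_w (b : Word) (hb : b.toNat < 0x800000) : b >>> 3 + 12582924 = shadowAddr (b.toNat / 8 + 12) := by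
  apply eq_shadowAddr
  have h3 := Asan.toNat_shr3 b
  rw [UInt64.toNat_add, h3]
  simp only [UInt64.reduceToNat]
  omega

/-- **The two inline shadow stores of the prologue** (0x10502e: F1F1F1F1H, 0x105038: F3F3F3F3H), as the walker writes them, are
the layout's `storesMem … prologue`. -/
theorem pm_prologue_stores_w (M : Mem) (b : Word) (hb : b.toNat < 0x800000) :
    (M.writeLE (b >>> 3 + 12582912) 4 4059165169).writeLE (b >>> 3 + 12582924) 4 4092851187 =
      storesMem M (b.toNat / 8) Toy.Frames.prog_main.prologue := by
  rw [pm_slot0_w b hb, pm_slot12_w b hb]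
  rfl

/-- **The two inline shadow stores of the epilogue** (0x10504d, 0x105057), as the walker writes them, are the layout's
`storesMem … epilogue`. -/
theorem pm_epilogue_stores_w (M : Mem) (b : Word) (hb : b.toNat < 0x800000) :
    (M.writeLE (b >>> 3 + 12582912) 4 0).writeLE (b >>> 3 + 12582924) 4 0 =
      storesMem M (b.toNat / 8) Toy.Frames.prog_main.epilogue := by
  rw [pm_slot0_w b hb, pm_slot12_w b hb]
  rfl

/-- **AFTER THE PROLOGUE** (0x105000 … 0x105038): four pushes, `sub rsp, 88H`, the three header words of the frame, the two inline
shadow stores. The layer holds with the function's own frame `(RA − 168, Toy.Frames.prog_main)` in front, the clean stack ending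
at `RA − 168` (the body's stack pointer). The memory is spelled as the walker's `w_mem` spells it. -/
theorem pm_prologue_inv_w {others : List Obj} {frames : List (Nat × FrameLayout)} {mem : Mem} {sp : Word} (x1 x2 x3 x4 : Nat)
    (h : ShadowInv others frames (sp.toNat + 8) mem) (hroom : 0x700000 + 288 ≤ sp.toNat) (h8 : sp.toNat % 8 = 0) :
    ShadowInv others ((sp.toNat - 168, Toy.Frames.prog_main) :: frames) (sp.toNat - 168)
      (((((((((mem.writeLE (sp - 8) 8 x1).writeLE (sp - 16) 8 x2).writeLE (sp - 24) 8 x3).writeLE (sp - 32) 8 x4).writeLE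
        (sp - 168) 8 1102416563).writeLE (sp - 160) 8 1315584).writeLE (sp - 152) 8 1069056).writeLE
        ((sp - 168) >>> 3 + 12582912) 4 4059165169).writeLE ((sp - 168) >>> 3 + 12582924) 4 4092851187) := by
  have hhi := h.stack.hi
  have e168 : (sp - 168).toNat = sp.toNat - 168 := pm_toNat_sub168_w sp (by omega)
  -- the two shadow stores are the layout's prologue
  rw [pm_prologue_stores_w _ _ (by omega), e168]
  -- the seven stores before them go to the stack
  have h1 := h.writeLE (sp - 8) 8 x1 (by u_omega) (by u_omega)
  have h2 := h1.writeLE (sp - 16) 8 x2 (by u_omega) (by u_omega)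
  have h3 := h2.writeLE (sp - 24) 8 x3 (by u_omega) (by u_omega)
  have h4 := h3.writeLE (sp - 32) 8 x4 (by u_omega) (by u_omega)
  have h5 := h4.writeLE (sp - 168) 8 1102416563 (by u_omega) (by u_omega)
  have h6 := h5.writeLE (sp - 160) 8 1315584 (by u_omega) (by u_omega)
  have h7 := h6.writeLE (sp - 152) 8 1069056 (by u_omega) (by u_omega)
  exact h7.prologue_ra Toy.Frames.prog_main_ok h8 (Nat.le_refl _) (by omega) (by omega)

/-- **`b` is the shadow index of the frame's base**: what `mov rbx, rsp ; shr rbx, 3` (0x10500d, 0x10502a) computed from the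
body's stack pointer `RA − 168`. A definition, so that `u_omega` does not see the shift: the walk goes on with `b` and two bounds. -/
def pm_IsBase_w (sp b : Word) : Prop := (sp - 168) >>> 3 = b

/-- The shadow index of the frame's base lies in the shadow of the stack region. -/
theorem pm_isBase_bounds_w (sp : Word) (hroom : 0x700000 + 288 ≤ sp.toNat) (hhi : sp.toNat + 8 ≤ 0x800000) :
    0xE0000 ≤ ((sp - 168) >>> 3).toNat ∧ ((sp - 168) >>> 3).toNat < 0x100000 := by
  rw [Asan.toNat_shr3, pm_toNat_sub168_w sp (by omega)]
  omega

/-- **AFTER THE EPILOGUE** (0x10504d, 0x105057): the frame is popped, the clean stack ends at `RA + 8` again (the stack pointer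
after the `ret`). `hfr`: the callers' protected frames lie above (from the entry's `StackOK.active`). -/
theorem pm_epilogue_inv_w {others : List Obj} {frames : List (Nat × FrameLayout)} {mem : Mem} {sp b : Word} {top' : Nat}
    (hb : pm_IsBase_w sp b)
    (h : ShadowInv others ((sp.toNat - 168, Toy.Frames.prog_main) :: frames) top' mem)
    (hroom : 0x700000 + 288 ≤ sp.toNat) (h8 : sp.toNat % 8 = 0) (hhi : sp.toNat + 8 ≤ 0x800000)
    (hfr : ∀ bF, bF ∈ frames → sp.toNat + 8 ≤ bF.1) :
    ShadowInv others frames (sp.toNat + 8) ((mem.writeLE (b + 12582912) 4 0).writeLE (b + 12582924) 4 0) := by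
  have e168 : (sp - 168).toNat = sp.toNat - 168 := pm_toNat_sub168_w sp (by omega)
  unfold pm_IsBase_w at hb
  rw [← hb, pm_epilogue_stores_w _ _ (by omega), e168]
  exact ShadowInv.epilogue_ra (F := Toy.Frames.prog_main) (top := sp.toNat) h h8 hhi hfr

/-- The callers' protected frames lie at or above the clean stack's end. -/
theorem pm_frames_above_w {others : List Obj} {frames : List (Nat × FrameLayout)} {mem : Mem} {top : Nat}
    (h : ShadowInv others frames top mem) : ∀ bF, bF ∈ frames → top ≤ bF.1 := by
  intro bF hbF
  obtain ⟨_, _, k3, _, _⟩ := h.stack.active bF hbF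
  exact k3

/-! ### The live objects of the body -/

/-- `buffer` (base + 32, 64 bytes; toy.c:67) is a live object of the frame list with the function's own frame in front. -/
theorem pm_live_buffer_w (others : List Obj) (frames : List (Nat × FrameLayout)) (base : Nat) :
    LiveIn others ((base, Toy.Frames.prog_main) :: frames) (base + 32) 64 := by
  refine ⟨⟨base + 32, 64, .stack⟩, ?_, Nat.le_refl _, Nat.le_refl _⟩
  rw [stackObjs_cons]
  apply List.mem_append_left
  apply List.mem_append_left
  unfold FrameLayout.objsAt Toy.Frames.prog_main
  simp only [List.map_cons, List.mem_cons, true_or]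

/-- A range that is live for the callers' frames is live with one more frame in front (the input, the output). -/
theorem pm_liveIn_cons_w {others : List Obj} {frames : List (Nat × FrameLayout)} {a n : Nat} (bF : Nat × FrameLayout)
    (h : LiveIn others frames a n) : LiveIn others (bF :: frames) a n := by
  obtain ⟨o, ho, k1, k2⟩ := h
  refine ⟨o, ?_, k1, k2⟩
  rw [stackObjs_cons]
  rcases List.mem_append.mp ho with hs | hoth
  · exact List.mem_append_left _ (List.mem_append_right _ hs)
  · exact List.mem_append_right _ hoth

/-! ### The assertions at the cut points of the body

  `u` is the state at the function's entry (RA = `u.reg .rsp`), `v` the state at the cut, `b` the shadow index of the frame's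
  base (`rbx` from 0x10502a on: `pm_IsBase_w (u.reg .rsp) b`). -/

/-- **What holds at every cut point between the prologue and the epilogue**: the body's stack pointer `RA − 168`, `rbx = b`,
`r14`/`r15` untouched, the four saved registers and the return address in their stack slots, the footprint so far (288 bytes of
stack, `out[0..8)`, the global `calls`, shadow bytes), the text, DF and the MXCSR masks, and the shadow layer with the function's
own frame `(RA − 168, Toy.Frames.prog_main)` in front, the clean stack ending at the body's stack pointer. -/
structure PmBody_w (others : List Obj) (frames : List (Nat × FrameLayout)) (u₀ u : State) (ret b : Word) (v : State) :
    Prop where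
  /-- the body's stack pointer -/
  rsp : v.reg .rsp = u.reg .rsp - 168
  /-- `rbx = base >> 3`, for the epilogue's two shadow stores -/
  rbx : v.reg .rbx = b
  /-- never written by `prog_main` -/
  r14 : v.reg .r14 = u.reg .r14
  /-- never written by `prog_main` -/
  r15 : v.reg .r15 = u.reg .r15
  /-- `push r13` (0x105000) -/
  s13 : UInt64.ofNat (v.mem.readLE (u.reg .rsp - 8) 8) = u.reg .r13
  /-- `push r12` (0x105002) -/
  s12 : UInt64.ofNat (v.mem.readLE (u.reg .rsp - 16) 8) = u.reg .r12
  /-- `push rbp` (0x105004) -/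
  sbp : UInt64.ofNat (v.mem.readLE (u.reg .rsp - 24) 8) = u.reg .rbp
  /-- `push rbx` (0x105005) -/
  sbx : UInt64.ofNat (v.mem.readLE (u.reg .rsp - 32) 8) = u.reg .rbx
  /-- the return address -/
  sra : UInt64.ofNat (v.mem.readLE (u.reg .rsp) 8) = ret
  /-- the footprint of the contract, so far -/
  same : Mem.SameExcept [⟨(u.reg .rsp).toNat - 288, (u.reg .rsp).toNat⟩, ⟨(u.reg .rdx).toNat, (u.reg .rdx).toNat + 8⟩,
    ⟨0x141c00, 0x141c08⟩, ⟨0xC00000, 0xE00000⟩] u.mem v.mem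
  /-- the image's text is that of the reference state -/
  code : Mem.EqOn ProgX.Base.L.textLo ProgX.Base.L.textHi u₀.mem v.mem
  /-- DF = 0 -/
  df : v.flags .df = false
  /-- the SSE exceptions are masked -/
  mx : v.mxcsr &&& 0x1F80 = 0x1F80
  /-- the shadow layer of the body -/
  shadow : ShadowInv others (((u.reg .rsp).toNat - 168, Toy.Frames.prog_main) :: frames) ((u.reg .rsp).toNat - 168) v.mem

/-- **At 0x10504d (cut1), the single epilogue**: reached from `cap < 8` (eax = 0) and from the end of the body (eax = 8). -/
structure PmAtCut1_w (others : List Obj) (frames : List (Nat × FrameLayout)) (u₀ u : State) (ret b : Word) (v : State) :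
    Prop where
  rip : v.rip = Toy.L.prog_main.cut1
  body : PmBody_w others frames u₀ u ret b v

/-- **At 0x10506f (cut2), `cap ≥ 8`** (toy.c:73): the three arguments `in`, `len`, `out` are still in their registers. -/
structure PmAtCut2_w (others : List Obj) (frames : List (Nat × FrameLayout)) (u₀ u : State) (ret b : Word) (v : State) :
    Prop where
  rip : v.rip = Toy.L.prog_main.cut2
  body : PmBody_w others frames u₀ u ret b v
  rdi : v.reg .rdi = u.reg .rdi
  rsi : v.reg .rsi = u.reg .rsi
  rdx : v.reg .rdx = u.reg .rdx

/-- **At 0x10508f (ret1), `clamp_length(len)` has returned** (toy.c:75): `r12 = in`, `rbp = out`, `rax = n ≤ 64`, and `n ≤ len`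
when `len` is not negative. -/
structure PmAtRet1_w (others : List Obj) (frames : List (Nat × FrameLayout)) (u₀ u : State) (ret b : Word) (v : State) :
    Prop where
  rip : v.rip = Toy.L.prog_main.ret1
  body : PmBody_w others frames u₀ u ret b v
  r12 : v.reg .r12 = u.reg .rdi
  rbp : v.reg .rbp = u.reg .rdx
  n_le : (v.reg .rax).toNat ≤ 64
  n_len : (u.reg .rsi).toNat < 2 ^ 63 → (v.reg .rax).toNat ≤ (u.reg .rsi).toNat

/-- **At 0x1050a2 (ret2), `fill_buffer(buffer, in, n)` has returned** (toy.c:76): `r13 = buffer = RA − 136`, `rbp = out`. -/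
structure PmAtRet2_w (others : List Obj) (frames : List (Nat × FrameLayout)) (u₀ u : State) (ret b : Word) (v : State) :
    Prop where
  rip : v.rip = Toy.L.prog_main.ret2
  body : PmBody_w others frames u₀ u ret b v
  r13 : v.reg .r13 = u.reg .rsp - 136
  rbp : v.reg .rbp = u.reg .rdx

/-- **At 0x1050aa (ret3), `weighted_sum(buffer)` has returned** (toy.c:77): `rbp = out`; the sum in `rax` is any word. -/
structure PmAtRet3_w (others : List Obj) (frames : List (Nat × FrameLayout)) (u₀ u : State) (ret b : Word) (v : State) :
    Prop where
  rip : v.rip = Toy.L.prog_main.ret3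
  body : PmBody_w others frames u₀ u ret b v
  rbp : v.reg .rbp = u.reg .rdx

/-! ### Part 2: the walk, one lemma per cut point (each ends at the next returned callee state / cut)

      pm_seg_entry_w   0x105000 → cut1 (cap < 8) ∨ cut2        the prologue, `if (cap < 8)`
      pm_seg_cut2_w    cut2 → ret1                              `calls++`, `call clamp_length`
      pm_seg_ret1_w    ret1 → ret2                              `call fill_buffer`
      pm_seg_ret2_w    ret2 → ret3                              `call weighted_sum`
      pm_seg_ret3_w    ret3 → cut1                              `call store_sum`, `return 8`
      pm_seg_cut1_w    cut1 → the state after the `ret`         the epilogue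
-/

/-- **The body's assertion after the prologue** (0x105000 … 0x105038), from the walker's description of the state: the stack
slots are read through the two shadow stores (`b = (RA − 168) >> 3` lies in the shadow of the stack region), the footprint
is the stack and shadow bytes, the layer is `pm_prologue_inv_w`. -/
theorem pm_body_prologue_w {Lay : Layout} (hLay : Lay.hi = 0x1000000) {others : List Obj}
    {frames : List (Nat × FrameLayout)} {u₀ u : State} {ret : Word} {v : State}
    (he_retAddr : UInt64.ofNat (u.mem.readLE (u.reg .rsp) 8) = ret) (he_stack : Lay.Has (u.reg .rsp - 288) 296)
    (he_room : 0x700000 + 288 ≤ (u.reg .rsp).toNat) (he_align : (u.reg .rsp).toNat % 8 = 0)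
    (he_top : (u.reg .rsp).toNat + 8 ≤ 0x800000) (hinv : ShadowInv others frames ((u.reg .rsp).toNat + 8) u.mem)
    (h_rsp : v.reg .rsp = u.reg .rsp - 168) (h_rbx : v.reg .rbx = (u.reg .rsp - 168) >>> 3)
    (h_r14 : v.reg .r14 = u.reg .r14) (h_r15 : v.reg .r15 = u.reg .r15)
    (w_mem : v.mem =
      ((((((((u.mem.writeLE (u.reg .rsp - 8) 8 (u.reg .r13).toNat).writeLE (u.reg .rsp - 16) 8 (u.reg .r12).toNat).writeLE
        (u.reg .rsp - 24) 8 (u.reg .rbp).toNat).writeLE (u.reg .rsp - 32) 8 (u.reg .rbx).toNat).writeLE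
        (u.reg .rsp - 168) 8 1102416563).writeLE (u.reg .rsp - 160) 8 1315584).writeLE (u.reg .rsp - 152) 8 1069056).writeLE
        ((u.reg .rsp - 168) >>> 3 + 12582912) 4 4059165169).writeLE ((u.reg .rsp - 168) >>> 3 + 12582924) 4 4092851187)
    (h_eq : Mem.EqOn ProgX.Base.L.textLo ProgX.Base.L.textHi u₀.mem v.mem)
    (h_df : v.flags .df = false) (h_mx : v.mxcsr &&& 0x1F80 = 0x1F80) :
    PmBody_w others frames u₀ u ret ((u.reg .rsp - 168) >>> 3) v := by
  -- the layer, before the shift is hidden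
  have hshadow : ShadowInv others (((u.reg .rsp).toNat - 168, Toy.Frames.prog_main) :: frames) ((u.reg .rsp).toNat - 168)
      v.mem := by
    rw [w_mem]
    exact pm_prologue_inv_w _ _ _ _ hinv he_room he_align
  -- `rbx = base >> 3` as a variable `b` with two bounds
  obtain ⟨b, hbdef, hb1, hb2⟩ : ∃ b : Word, pm_IsBase_w (u.reg .rsp) b ∧ 0xE0000 ≤ b.toNat ∧ b.toNat < 0x100000 :=
    ⟨_, rfl, pm_isBase_bounds_w _ he_room he_top⟩
  have eb : (u.reg .rsp - 168) >>> 3 = b := hbdef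
  rw [eb] at h_rbx w_mem ⊢
  clear eb hbdef
  -- the range facts of the two shadow stores: `u_resolve` reads a slot through a store only with both ranges at hand
  have w_has_10502e : Lay.Has (b + 12582912) 4 := by u_omega
  have w_has_105038 : Lay.Has (b + 12582924) 4 := by u_omega
  refine ⟨h_rsp, h_rbx, h_r14, h_r15, ?_, ?_, ?_, ?_, ?_, ?_, h_eq, h_df, h_mx, hshadow⟩
  · u_resolve
  · u_resolve
  · u_resolve
  · u_resolve
  · u_resolve
  · rw [w_mem]
    u_same

/-- **0x105000 … 0x105046 / 0x105048: the prologue and `if (cap < 8)`** (toy.c:65–73). Four pushes, `sub rsp, 88H`, the three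
header words, the two inline shadow stores, `cmp rcx, 7 ; jg`: `cap < 8` goes on with `mov eax, 0` to the epilogue (cut1),
`cap ≥ 8` to the body (cut2). At both cuts the body's assertion holds, with `b = (RA − 168) >> 3`. -/
theorem pm_seg_entry_w (Lay : Layout) (hLay : Lay.hi = 0x1000000) (μ : Microarch) (hμ : UserX.MicroOK μ) (u₀ : State)
    (hcode : HasCodeNat Lay u₀ Toy.L.prog_main.entry Toy.Code.code_prog_main.nat Toy.L.prog_main.size)
    (others : List Obj) (frames : List (Nat × FrameLayout)) (u : State) (ret : Word)
    (he : AtEntry (ProgX.Base.conv u₀) Toy.L.prog_main.entry (prog_main.spec others frames).frame ret u)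
    (hpre : (prog_main.spec others frames).pre u) :
    ReachVia Lay μ ProgX.Base.WayInv u (fun v =>
      PmAtCut1_w others frames u₀ u ret ((u.reg .rsp - 168) >>> 3) v ∨
      PmAtCut2_w others frames u₀ u ret ((u.reg .rsp - 168) >>> 3) v) := by
  v_entry he
  obtain ⟨hsh, hlen, hin, hout, houtoff, hw⟩ := hpre
  u_walk hcode [hμ.vendor] until [Toy.L.prog_main.cut1, Toy.L.prog_main.cut2] span [ProgX.Base.L.textLo, ProgX.Base.L.textHi] side (v_side)
  · -- 0x10506f (cut2): `cap ≥ 8`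
    have hdf : s_105046.flags .df = false := by
      rw [w_flags]
      simp only [X86.User.df_setStatus]
      exact he_df
    have hmx : s_105046.mxcsr &&& 0x1F80 = 0x1F80 := by
      rw [w_mxcsr]
      exact he_mx
    have hbody := pm_body_prologue_w hLay he_retAddr he_stack he_room he_align he_top hsh.inv w_rsp w_rbx (w_kept.get .r14 rfl)
      (w_kept.get .r15 rfl) w_mem w_eq hdf hmx
    exact ReachVia.done (Or.inr ⟨w_rip, hbody, w_kept.get .rdi rfl, w_kept.get .rsi rfl, w_kept.get .rdx rfl⟩)
  · -- 0x10504d (cut1): `cap < 8`, eax = 0 (toy.c:74 `return 0`)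
    have hdf : s_105048.flags .df = false := by
      rw [w_flags]
      simp only [X86.User.df_setStatus]
      exact he_df
    have hmx : s_105048.mxcsr &&& 0x1F80 = 0x1F80 := by
      rw [w_mxcsr]
      exact he_mx
    have hbody := pm_body_prologue_w hLay he_retAddr he_stack he_room he_align he_top hsh.inv w_rsp w_rbx (w_kept.get .r14 rfl)
      (w_kept.get .r15 rfl) w_mem w_eq hdf hmx
    exact ReachVia.done (Or.inl ⟨w_rip, hbody⟩)

/-- **0x10506f … 0x10508a, `call clamp_length`, 0x10508f (ret1)** (toy.c:75 `calls++ ; n = clamp_length(len)`). `r12 = in`,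
`rbp = out`, the unchecked load and store of the global `calls` (141C00H), `rdi = len`, the call: afterwards `rax = n ≤ 64`. -/
theorem pm_seg_cut2_w (Lay : Layout) (hLay : Lay.hi = 0x1000000) (μ : Microarch) (hμ : UserX.MicroOK μ) (u₀ : State)
    (hcode : HasCodeNat Lay u₀ Toy.L.prog_main.entry Toy.Code.code_prog_main.nat Toy.L.prog_main.size)
    (others : List Obj) (frames : List (Nat × FrameLayout)) (u : State) (ret : Word)
    (h_clamp_length : Calls Lay μ ProgX.Base.WayInv (ProgX.Base.conv u₀) Toy.L.clamp_length.entry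
      (Toy.Spec.clamp_length.spec others (((u.reg .rsp).toNat - 168, Toy.Frames.prog_main) :: frames)))
    (he : AtEntry (ProgX.Base.conv u₀) Toy.L.prog_main.entry (prog_main.spec others frames).frame ret u)
    (hpre : (prog_main.spec others frames).pre u) (b : Word) (v : State)
    (hat : PmAtCut2_w others frames u₀ u ret b v) :
    ReachVia Lay μ ProgX.Base.WayInv v (PmAtRet1_w others frames u₀ u ret b) := by
  v_entry he
  obtain ⟨hsh, hlen, hin, hout, houtoff, hw⟩ := hpre
  obtain ⟨w_rip, hbody, c_rdi, c_rsi, c_rdx⟩ := hat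
  -- the state at the cut, under the names the walker reads
  have c_rsp : v.reg .rsp = u.reg .rsp - 168 := hbody.rsp
  have c_rbx : v.reg .rbx = b := hbody.rbx
  have w_kept : RegsKept [.rsp] v v := RegsKept.refl _ _
  have w_eq : Mem.EqOn ProgX.Base.L.textLo ProgX.Base.L.textHi u₀.mem v.mem := hbody.code
  have hdf : v.flags .df = false := hbody.df
  have hmx : v.mxcsr &&& 0x1F80 = 0x1F80 := hbody.mx
  have hsse : SseOK v := ProgX.Base.sseOK_of_abiInv ⟨hdf, hmx⟩
  have k_r13 : UInt64.ofNat (v.mem.readLE (u.reg .rsp - 8) 8) = u.reg .r13 := hbody.s13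
  have k_r12 : UInt64.ofNat (v.mem.readLE (u.reg .rsp - 16) 8) = u.reg .r12 := hbody.s12
  have k_rbp : UInt64.ofNat (v.mem.readLE (u.reg .rsp - 24) 8) = u.reg .rbp := hbody.sbp
  have k_rbx : UInt64.ofNat (v.mem.readLE (u.reg .rsp - 32) 8) = u.reg .rbx := hbody.sbx
  have k_ra : UInt64.ofNat (v.mem.readLE (u.reg .rsp) 8) = ret := hbody.sra
  have hsame : Mem.SameExcept [⟨(u.reg .rsp).toNat - 288, (u.reg .rsp).toNat⟩,
      ⟨(u.reg .rdx).toNat, (u.reg .rdx).toNat + 8⟩, ⟨0x141c00, 0x141c08⟩, ⟨0xC00000, 0xE00000⟩] u.mem v.mem := hbody.same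
  u_walk hcode [hμ.vendor] until [Toy.L.prog_main.ret1] span [ProgX.Base.L.textLo, ProgX.Base.L.textHi] side (v_side)
  case call_inv =>
    v_inv
  case pre_10508a =>
    -- clamp_length's precondition: the layer over the store to `calls` and the pushed return address
    have e_rsp : (s_10508a.reg .rsp).toNat + 8 = (u.reg .rsp).toNat - 168 := by
      rw [w_rsp]
      u_omega
    refine ⟨?_, hsh.offText⟩
    rw [e_rsp, w_mem]
    refine ShadowInv.writeLE ?_ _ _ _ (by u_omega) (by u_omega)
    exact hbody.shadow.writeLE _ _ _ (by u_omega) (by u_omega)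
  -- 0x10508f (ret1): clamp_length has returned
  have hinv1 : ShadowInv others (((u.reg .rsp).toNat - 168, Toy.Frames.prog_main) :: frames)
      ((u.reg .rsp).toNat - 168) s_10508a.mem := by
    rw [w_mem_10508a]
    refine ShadowInv.writeLE ?_ _ _ _ (by u_omega) (by u_omega)
    exact hbody.shadow.writeLE _ _ _ (by u_omega) (by u_omega)
  v_after_call w_rsp_10508a w_mem_10508a
  obtain ⟨hn64, hnlen, hun⟩ := w_post
  rw [w_rdi_10508a] at hnlen
  refine ReachVia.done ⟨w_rip, ⟨w_rsp, ?_, ?_, ?_, ?_, ?_, ?_, ?_, ?_, ?_, w_eq, w_df, w_mx, hinv1.untouched hun⟩, w_r12,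
    w_rbp, hn64, hnlen⟩
  · exact (w_kept.get .rbx rfl).trans c_rbx
  · exact (w_kept.get .r14 rfl).trans hbody.r14
  · exact (w_kept.get .r15 rfl).trans hbody.r15
  · u_frame k_r13
  · u_frame k_r12
  · u_frame k_rbp
  · u_frame k_rbx
  · u_frame k_ra
  · u_same

/-- **fill_buffer's precondition about the copy** (toy.c:76 `fill_buffer(buffer, in, n)`): `n = 0`, or the `n ≤ len` bytes at `in`
are live and the copy's overlap is harmless — the input is off the stack region, the buffer (at `RA − 136`) is on it. -/
theorem pm_fill_pre_w {others : List Obj} {frames : List (Nat × FrameLayout)} {sp din len n : Nat} (bF : Nat × FrameLayout)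
    (hroom : 0x700000 + 288 ≤ sp) (hhi : sp + 8 ≤ 0x800000) (hlen : len ≤ 0x1FF000)
    (hin : len = 0 ∨ (LiveIn others frames din len ∧ (din + len ≤ 0x700000 ∨ 0x800000 ≤ din)))
    (hnlen : len < 2 ^ 63 → n ≤ len) :
    n = 0 ∨ (LiveIn others (bF :: frames) din n ∧ (sp - 136 ≤ din ∨ din + n ≤ sp - 136)) := by
  have hn := hnlen (by omega)
  rcases hin with h0 | ⟨hlive, hoff⟩
  · left
    omega
  · right
    refine ⟨pm_liveIn_cons_w bF (hlive.sub din n (Nat.le_refl _) (by omega)), ?_⟩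
    omega

/-- **0x10508f … 0x10509d, `call fill_buffer`, 0x1050a2 (ret2)** (toy.c:76). `rdx = n`, `r13 = rdi = buffer = RA − 136`,
`rsi = in`; fill_buffer's precondition is stated with the frame list that has the function's own frame in front, in which
`buffer` is a live stack object. Its footprint (the buffer, 112 bytes of stack) lies inside this function's stack window. -/
theorem pm_seg_ret1_w (Lay : Layout) (hLay : Lay.hi = 0x1000000) (μ : Microarch) (hμ : UserX.MicroOK μ) (u₀ : State)
    (hcode : HasCodeNat Lay u₀ Toy.L.prog_main.entry Toy.Code.code_prog_main.nat Toy.L.prog_main.size)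
    (others : List Obj) (frames : List (Nat × FrameLayout)) (u : State) (ret : Word)
    (h_fill_buffer : Calls Lay μ ProgX.Base.WayInv (ProgX.Base.conv u₀) Toy.L.fill_buffer.entry
      (Toy.Spec.fill_buffer.spec others (((u.reg .rsp).toNat - 168, Toy.Frames.prog_main) :: frames)))
    (he : AtEntry (ProgX.Base.conv u₀) Toy.L.prog_main.entry (prog_main.spec others frames).frame ret u)
    (hpre : (prog_main.spec others frames).pre u) (b : Word) (v : State)
    (hat : PmAtRet1_w others frames u₀ u ret b v) :
    ReachVia Lay μ ProgX.Base.WayInv v (PmAtRet2_w others frames u₀ u ret b) := by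
  v_entry he
  obtain ⟨hsh, hlen, hin, hout, houtoff, hw⟩ := hpre
  obtain ⟨w_rip, hbody, c_r12, c_rbp, hn64, hnlen⟩ := hat
  -- the state at the cut, under the names the walker reads; `rax = n` as a variable
  obtain ⟨n, c_rax⟩ : ∃ n, v.reg .rax = n := ⟨_, rfl⟩
  rw [c_rax] at hn64 hnlen
  have c_rsp : v.reg .rsp = u.reg .rsp - 168 := hbody.rsp
  have c_rbx : v.reg .rbx = b := hbody.rbx
  have w_kept : RegsKept [.rsp] v v := RegsKept.refl _ _
  have w_eq : Mem.EqOn ProgX.Base.L.textLo ProgX.Base.L.textHi u₀.mem v.mem := hbody.code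
  have hdf : v.flags .df = false := hbody.df
  have hmx : v.mxcsr &&& 0x1F80 = 0x1F80 := hbody.mx
  have hsse : SseOK v := ProgX.Base.sseOK_of_abiInv ⟨hdf, hmx⟩
  have k_r13 : UInt64.ofNat (v.mem.readLE (u.reg .rsp - 8) 8) = u.reg .r13 := hbody.s13
  have k_r12 : UInt64.ofNat (v.mem.readLE (u.reg .rsp - 16) 8) = u.reg .r12 := hbody.s12
  have k_rbp : UInt64.ofNat (v.mem.readLE (u.reg .rsp - 24) 8) = u.reg .rbp := hbody.sbp
  have k_rbx : UInt64.ofNat (v.mem.readLE (u.reg .rsp - 32) 8) = u.reg .rbx := hbody.sbx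
  have k_ra : UInt64.ofNat (v.mem.readLE (u.reg .rsp) 8) = ret := hbody.sra
  have hsame : Mem.SameExcept [⟨(u.reg .rsp).toNat - 288, (u.reg .rsp).toNat⟩,
      ⟨(u.reg .rdx).toNat, (u.reg .rdx).toNat + 8⟩, ⟨0x141c00, 0x141c08⟩, ⟨0xC00000, 0xE00000⟩] u.mem v.mem := hbody.same
  u_walk hcode [hμ.vendor] until [Toy.L.prog_main.ret2] span [ProgX.Base.L.textLo, ProgX.Base.L.textHi] side (v_side)
  case call_inv =>
    v_inv
  case pre_10509d =>
    -- fill_buffer's precondition: the layer over the pushed return address, n ≤ 64, the buffer, the input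
    have e_rsp : (s_10509d.reg .rsp).toNat + 8 = (u.reg .rsp).toNat - 168 := by
      rw [w_rsp]
      u_omega
    have e_rdi : (s_10509d.reg .rdi).toNat = (u.reg .rsp).toNat - 168 + 32 := by
      rw [w_rdi]
      u_omega
    have e_buf : (u.reg .rsp).toNat - 168 + 32 = (u.reg .rsp).toNat - 136 := by
      omega
    refine ⟨⟨?_, hsh.offText⟩, ?_, ?_, ?_⟩
    · rw [e_rsp, w_mem]
      exact hbody.shadow.writeLE _ _ _ (by u_omega) (by u_omega)
    · rw [w_rdx]
      exact hn64
    · rw [e_rdi]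
      exact pm_live_buffer_w _ _ _
    · rw [w_rdx, w_rsi, e_rdi, e_buf]
      exact pm_fill_pre_w _ he_room he_top hlen hin hnlen
  -- 0x1050a2 (ret2): fill_buffer has returned
  have hinv1 : ShadowInv others (((u.reg .rsp).toNat - 168, Toy.Frames.prog_main) :: frames)
      ((u.reg .rsp).toNat - 168) s_10509d.mem := by
    rw [w_mem_10509d]
    exact hbody.shadow.writeLE _ _ _ (by u_omega) (by u_omega)
  -- the callee's footprint as numbers over the entry state (its window mentions rdi: the buffer)
  v_after_call w_rsp_10509d w_mem_10509d
  simp only [w_rdi_10509d] at w_same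
  have hun : ShadowUntouched s_10509d.mem s_10509dr.mem := w_post
  refine ReachVia.done ⟨w_rip, ⟨w_rsp, ?_, ?_, ?_, ?_, ?_, ?_, ?_, ?_, ?_, w_eq, w_df, w_mx, hinv1.untouched hun⟩, w_r13, ?_⟩
  · exact (w_kept.get .rbx rfl).trans c_rbx
  · exact (w_kept.get .r14 rfl).trans hbody.r14
  · exact (w_kept.get .r15 rfl).trans hbody.r15
  · u_frame k_r13
  · u_frame k_r12
  · u_frame k_rbp
  · u_frame k_rbx
  · u_frame k_ra
  · u_same
  · exact (w_kept.get .rbp rfl).trans c_rbp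

/-- **0x1050a2 … 0x1050a5, `call weighted_sum`, 0x1050aa (ret3)** (toy.c:77 `sum = weighted_sum(buffer)`). `rdi = r13 = buffer`:
a live stack object of the frame list with the function's own frame in front; `weights` is one of the `others`. The callee
writes its 64 bytes of stack only. -/
theorem pm_seg_ret2_w (Lay : Layout) (hLay : Lay.hi = 0x1000000) (μ : Microarch) (hμ : UserX.MicroOK μ) (u₀ : State)
    (hcode : HasCodeNat Lay u₀ Toy.L.prog_main.entry Toy.Code.code_prog_main.nat Toy.L.prog_main.size)
    (others : List Obj) (frames : List (Nat × FrameLayout)) (u : State) (ret : Word)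
    (h_weighted_sum : Calls Lay μ ProgX.Base.WayInv (ProgX.Base.conv u₀) Toy.L.weighted_sum.entry
      (Toy.Spec.weighted_sum.spec others (((u.reg .rsp).toNat - 168, Toy.Frames.prog_main) :: frames)))
    (he : AtEntry (ProgX.Base.conv u₀) Toy.L.prog_main.entry (prog_main.spec others frames).frame ret u)
    (hpre : (prog_main.spec others frames).pre u) (b : Word) (v : State)
    (hat : PmAtRet2_w others frames u₀ u ret b v) :
    ReachVia Lay μ ProgX.Base.WayInv v (PmAtRet3_w others frames u₀ u ret b) := by
  v_entry he
  obtain ⟨hsh, hlen, hin, hout, houtoff, hw⟩ := hpre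
  obtain ⟨w_rip, hbody, c_r13, c_rbp⟩ := hat
  -- the state at the cut, under the names the walker reads
  have c_rsp : v.reg .rsp = u.reg .rsp - 168 := hbody.rsp
  have c_rbx : v.reg .rbx = b := hbody.rbx
  have w_kept : RegsKept [.rsp] v v := RegsKept.refl _ _
  have w_eq : Mem.EqOn ProgX.Base.L.textLo ProgX.Base.L.textHi u₀.mem v.mem := hbody.code
  have hdf : v.flags .df = false := hbody.df
  have hmx : v.mxcsr &&& 0x1F80 = 0x1F80 := hbody.mx
  have hsse : SseOK v := ProgX.Base.sseOK_of_abiInv ⟨hdf, hmx⟩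
  have k_r13 : UInt64.ofNat (v.mem.readLE (u.reg .rsp - 8) 8) = u.reg .r13 := hbody.s13
  have k_r12 : UInt64.ofNat (v.mem.readLE (u.reg .rsp - 16) 8) = u.reg .r12 := hbody.s12
  have k_rbp : UInt64.ofNat (v.mem.readLE (u.reg .rsp - 24) 8) = u.reg .rbp := hbody.sbp
  have k_rbx : UInt64.ofNat (v.mem.readLE (u.reg .rsp - 32) 8) = u.reg .rbx := hbody.sbx
  have k_ra : UInt64.ofNat (v.mem.readLE (u.reg .rsp) 8) = ret := hbody.sra
  have hsame : Mem.SameExcept [⟨(u.reg .rsp).toNat - 288, (u.reg .rsp).toNat⟩,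
      ⟨(u.reg .rdx).toNat, (u.reg .rdx).toNat + 8⟩, ⟨0x141c00, 0x141c08⟩, ⟨0xC00000, 0xE00000⟩] u.mem v.mem := hbody.same
  u_walk hcode [hμ.vendor] until [Toy.L.prog_main.ret3] span [ProgX.Base.L.textLo, ProgX.Base.L.textHi] side (v_side)
  case call_inv =>
    v_inv
  case pre_1050a5 =>
    -- weighted_sum's precondition: the layer over the pushed return address, the buffer, `weights`
    have e_rsp : (s_1050a5.reg .rsp).toNat + 8 = (u.reg .rsp).toNat - 168 := by
      rw [w_rsp]
      u_omega
    have e_rdi : (s_1050a5.reg .rdi).toNat = (u.reg .rsp).toNat - 168 + 32 := by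
      rw [w_rdi]
      u_omega
    refine ⟨⟨?_, hsh.offText⟩, ?_, hw⟩
    · rw [e_rsp, w_mem]
      exact hbody.shadow.writeLE _ _ _ (by u_omega) (by u_omega)
    · rw [e_rdi]
      exact pm_live_buffer_w _ _ _
  -- 0x1050aa (ret3): weighted_sum has returned
  have hinv1 : ShadowInv others (((u.reg .rsp).toNat - 168, Toy.Frames.prog_main) :: frames)
      ((u.reg .rsp).toNat - 168) s_1050a5.mem := by
    rw [w_mem_1050a5]
    exact hbody.shadow.writeLE _ _ _ (by u_omega) (by u_omega)
  v_after_call w_rsp_1050a5 w_mem_1050a5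
  have hun : ShadowUntouched s_1050a5.mem s_1050a5r.mem := w_post
  refine ReachVia.done ⟨w_rip, ⟨w_rsp, ?_, ?_, ?_, ?_, ?_, ?_, ?_, ?_, ?_, w_eq, w_df, w_mx, hinv1.untouched hun⟩, ?_⟩
  · exact (w_kept.get .rbx rfl).trans c_rbx
  · exact (w_kept.get .r14 rfl).trans hbody.r14
  · exact (w_kept.get .r15 rfl).trans hbody.r15
  · u_frame k_r13
  · u_frame k_r12
  · u_frame k_rbp
  · u_frame k_rbx
  · u_frame k_ra
  · u_same
  · exact (w_kept.get .rbp rfl).trans c_rbp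

/-- **0x1050aa … 0x1050b0, `call store_sum`, 0x1050b5 (ret4), `mov eax, 8 ; jmp` to the epilogue (cut1)** (toy.c:78–79
`store_sum(out, sum) ; return 8`). `rdi = rbp = out`: 8 live bytes off the stack region (this function's precondition), so the
stack slots are read through the callee's window `out[0..8)`. -/
theorem pm_seg_ret3_w (Lay : Layout) (hLay : Lay.hi = 0x1000000) (μ : Microarch) (hμ : UserX.MicroOK μ) (u₀ : State)
    (hcode : HasCodeNat Lay u₀ Toy.L.prog_main.entry Toy.Code.code_prog_main.nat Toy.L.prog_main.size)
    (others : List Obj) (frames : List (Nat × FrameLayout)) (u : State) (ret : Word)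
    (h_store_sum : Calls Lay μ ProgX.Base.WayInv (ProgX.Base.conv u₀) Toy.L.store_sum.entry
      (Toy.Spec.store_sum.spec others (((u.reg .rsp).toNat - 168, Toy.Frames.prog_main) :: frames)))
    (he : AtEntry (ProgX.Base.conv u₀) Toy.L.prog_main.entry (prog_main.spec others frames).frame ret u)
    (hpre : (prog_main.spec others frames).pre u) (b : Word) (v : State)
    (hat : PmAtRet3_w others frames u₀ u ret b v) :
    ReachVia Lay μ ProgX.Base.WayInv v (PmAtCut1_w others frames u₀ u ret b) := by
  v_entry he
  obtain ⟨hsh, hlen, hin, hout, houtoff, hw⟩ := hpre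
  obtain ⟨w_rip, hbody, c_rbp⟩ := hat
  -- the state at the cut, under the names the walker reads
  have c_rsp : v.reg .rsp = u.reg .rsp - 168 := hbody.rsp
  have c_rbx : v.reg .rbx = b := hbody.rbx
  have w_kept : RegsKept [.rsp] v v := RegsKept.refl _ _
  have w_eq : Mem.EqOn ProgX.Base.L.textLo ProgX.Base.L.textHi u₀.mem v.mem := hbody.code
  have hdf : v.flags .df = false := hbody.df
  have hmx : v.mxcsr &&& 0x1F80 = 0x1F80 := hbody.mx
  have hsse : SseOK v := ProgX.Base.sseOK_of_abiInv ⟨hdf, hmx⟩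
  have k_r13 : UInt64.ofNat (v.mem.readLE (u.reg .rsp - 8) 8) = u.reg .r13 := hbody.s13
  have k_r12 : UInt64.ofNat (v.mem.readLE (u.reg .rsp - 16) 8) = u.reg .r12 := hbody.s12
  have k_rbp : UInt64.ofNat (v.mem.readLE (u.reg .rsp - 24) 8) = u.reg .rbp := hbody.sbp
  have k_rbx : UInt64.ofNat (v.mem.readLE (u.reg .rsp - 32) 8) = u.reg .rbx := hbody.sbx
  have k_ra : UInt64.ofNat (v.mem.readLE (u.reg .rsp) 8) = ret := hbody.sra
  have hsame : Mem.SameExcept [⟨(u.reg .rsp).toNat - 288, (u.reg .rsp).toNat⟩,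
      ⟨(u.reg .rdx).toNat, (u.reg .rdx).toNat + 8⟩, ⟨0x141c00, 0x141c08⟩, ⟨0xC00000, 0xE00000⟩] u.mem v.mem := hbody.same
  u_walk hcode [hμ.vendor] until [Toy.L.prog_main.ret4] span [ProgX.Base.L.textLo, ProgX.Base.L.textHi] side (v_side)
  case call_inv =>
    v_inv
  case pre_1050b0 =>
    -- store_sum's precondition: the layer over the pushed return address, the 8 bytes at `out`
    have e_rsp : (s_1050b0.reg .rsp).toNat + 8 = (u.reg .rsp).toNat - 168 := by
      rw [w_rsp]
      u_omega
    refine ⟨⟨?_, hsh.offText⟩, ?_⟩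
    · rw [e_rsp, w_mem]
      exact hbody.shadow.writeLE _ _ _ (by u_omega) (by u_omega)
    · rw [w_rdi]
      exact pm_liveIn_cons_w _ hout
  -- 0x1050b5 (ret4): store_sum has returned
  have hinv1 : ShadowInv others (((u.reg .rsp).toNat - 168, Toy.Frames.prog_main) :: frames)
      ((u.reg .rsp).toNat - 168) s_1050b0.mem := by
    rw [w_mem_1050b0]
    exact hbody.shadow.writeLE _ _ _ (by u_omega) (by u_omega)
  -- the callee's footprint as numbers over the entry state (its window mentions rdi: `out`)
  v_after_call w_rsp_1050b0 w_mem_1050b0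
  simp only [w_rdi_1050b0] at w_same
  have hun : ShadowUntouched s_1050b0.mem s_1050b0r.mem := w_post
  have hinv2 := hinv1.untouched hun
  -- the stack slots, read through the callee's footprint (`out` is off the stack region)
  have j_r13 : UInt64.ofNat (s_1050b0r.mem.readLE (u.reg .rsp - 8) 8) = u.reg .r13 := by u_frame k_r13
  have j_r12 : UInt64.ofNat (s_1050b0r.mem.readLE (u.reg .rsp - 16) 8) = u.reg .r12 := by u_frame k_r12
  have j_rbp : UInt64.ofNat (s_1050b0r.mem.readLE (u.reg .rsp - 24) 8) = u.reg .rbp := by u_frame k_rbp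
  have j_rbx : UInt64.ofNat (s_1050b0r.mem.readLE (u.reg .rsp - 32) 8) = u.reg .rbx := by u_frame k_rbx
  have j_ra : UInt64.ofNat (s_1050b0r.mem.readLE (u.reg .rsp) 8) = ret := by u_frame k_ra
  have hsame2 : Mem.SameExcept [⟨(u.reg .rsp).toNat - 288, (u.reg .rsp).toNat⟩,
      ⟨(u.reg .rdx).toNat, (u.reg .rdx).toNat + 8⟩, ⟨0x141c00, 0x141c08⟩, ⟨0xC00000, 0xE00000⟩] u.mem s_1050b0r.mem := by
    u_same
  -- 0x1050b5 … 0x1050ba: `mov eax, 8 ; jmp 10504d` (toy.c:79 `return 8`)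
  u_walk hcode [hμ.vendor] until [Toy.L.prog_main.cut1] span [ProgX.Base.L.textLo, ProgX.Base.L.textHi] side (v_side)
  -- 0x10504d (cut1): nothing was stored since the call returned
  refine ReachVia.done ⟨w_rip, ⟨w_rsp, ?_, ?_, ?_, ?_, ?_, ?_, ?_, ?_, ?_, w_eq, ?_, ?_, ?_⟩⟩
  · exact (w_kept.get .rbx rfl).trans c_rbx
  · exact (w_kept.get .r14 rfl).trans hbody.r14
  · exact (w_kept.get .r15 rfl).trans hbody.r15
  · rw [w_mem]
    exact j_r13
  · rw [w_mem]
    exact j_r12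
  · rw [w_mem]
    exact j_rbp
  · rw [w_mem]
    exact j_rbx
  · rw [w_mem]
    exact j_ra
  · rw [w_mem]
    exact hsame2
  · rw [w_flags]
    exact w_df
  · rw [w_mxcsr]
    exact w_mx
  · rw [w_mem]
    exact hinv2

/-- **0x10504d … 0x10506e: the single epilogue** (toy.c:80). The two inline shadow stores of value 0, `add rsp, 88H`, four pops,
`ret`: the function has returned; the shadow layer is the one of the entry again (`pm_epilogue_inv_w`). -/
theorem pm_seg_cut1_w (Lay : Layout) (hLay : Lay.hi = 0x1000000) (μ : Microarch) (hμ : UserX.MicroOK μ) (u₀ : State)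
    (hcode : HasCodeNat Lay u₀ Toy.L.prog_main.entry Toy.Code.code_prog_main.nat Toy.L.prog_main.size)
    (others : List Obj) (frames : List (Nat × FrameLayout)) (u : State) (ret : Word)
    (he : AtEntry (ProgX.Base.conv u₀) Toy.L.prog_main.entry (prog_main.spec others frames).frame ret u)
    (hpre : (prog_main.spec others frames).pre u) (b : Word) (hb : pm_IsBase_w (u.reg .rsp) b) (v : State)
    (hat : PmAtCut1_w others frames u₀ u ret b v) :
    ReachVia Lay μ ProgX.Base.WayInv v (Returned (ProgX.Base.conv u₀) (prog_main.spec others frames) u ret) := by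
  v_entry he
  obtain ⟨hsh, hlen, hin, hout, houtoff, hw⟩ := hpre
  obtain ⟨w_rip, hbody⟩ := hat
  -- the bounds of `b = (RA − 168) >> 3`
  have hbb := pm_isBase_bounds_w (u.reg .rsp) he_room he_top
  have eb : (u.reg .rsp - 168) >>> 3 = b := hb
  rw [eb] at hbb
  obtain ⟨hb1, hb2⟩ := hbb
  clear eb
  -- the state at the cut, under the names the walker reads
  have c_rsp : v.reg .rsp = u.reg .rsp - 168 := hbody.rsp
  have c_rbx : v.reg .rbx = b := hbody.rbx
  have w_kept : RegsKept [.rsp] v v := RegsKept.refl _ _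
  have w_eq : Mem.EqOn ProgX.Base.L.textLo ProgX.Base.L.textHi u₀.mem v.mem := hbody.code
  have hdf : v.flags .df = false := hbody.df
  have hmx : v.mxcsr &&& 0x1F80 = 0x1F80 := hbody.mx
  have hsse : SseOK v := ProgX.Base.sseOK_of_abiInv ⟨hdf, hmx⟩
  have k_r13 : UInt64.ofNat (v.mem.readLE (u.reg .rsp - 8) 8) = u.reg .r13 := hbody.s13
  have k_r12 : UInt64.ofNat (v.mem.readLE (u.reg .rsp - 16) 8) = u.reg .r12 := hbody.s12
  have k_rbp : UInt64.ofNat (v.mem.readLE (u.reg .rsp - 24) 8) = u.reg .rbp := hbody.sbp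
  have k_rbx : UInt64.ofNat (v.mem.readLE (u.reg .rsp - 32) 8) = u.reg .rbx := hbody.sbx
  have k_ra : UInt64.ofNat (v.mem.readLE (u.reg .rsp) 8) = ret := hbody.sra
  u_walk hcode [hμ.vendor] span [ProgX.Base.L.textLo, ProgX.Base.L.textHi] side (v_side)
  -- 0x10506e: the `ret` has been executed
  have hsame : Mem.SameExcept [⟨(u.reg .rsp).toNat - 288, (u.reg .rsp).toNat⟩,
      ⟨(u.reg .rdx).toNat, (u.reg .rdx).toNat + 8⟩, ⟨0x141c00, 0x141c08⟩, ⟨0xC00000, 0xE00000⟩] u.mem v.mem := hbody.same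
  refine ReachVia.done ?_
  refine X86.User.Returned.mk w_rip w_rsp ?_ ?_ (ProgX.Base.conv_code_in w_eq) ?_ ?_
  · -- saved: rbx, rbp, r12, r13 popped back; r14, r15 never written
    intro r hr
    cases r <;> first
      | exact absurd hr (by decide)
      | (with_reducible assumption)
      | exact (w_kept _ rfl).trans hbody.r14
      | exact (w_kept _ rfl).trans hbody.r15
  · -- same: the two shadow stores lie in the shadow window of the footprint
    simp only [X86.User.Spec.footprint, vspec]
    rw [w_mem]
    u_same
  · -- inv
    v_inv
  · -- the postcondition: the epilogue's two shadow stores give the layer of the entry back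
    have e_rsp : (s_10506e.reg .rsp).toNat = (u.reg .rsp).toNat + 8 := by
      rw [w_rsp]
      u_omega
    show ShadowInv others frames (s_10506e.reg .rsp).toNat s_10506e.mem
    rw [e_rsp, w_mem]
    exact pm_epilogue_inv_w hb hbody.shadow he_room he_align he_top (pm_frames_above_w hsh.inv)

end Toy.Spec.Proved.prog_main
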